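-- pv_equiv track=rewrite | github.com/SergeantSuj/fantasy-baseball | scripts/import_rank_sources.py | dedupe_player_pool
-- ===== SOURCE A (Python) =====
-- import unicodedata
--
-- def normalize_name(name: str) -> str:
--     normalized = unicodedata.normalize("NFKD", name).encode("ascii", "ignore").decode("ascii")
--     normalized = normalized.lower().replace(".", " ").replace("-", " ")
--     normalized = " ".join(normalized.split())
--     return normalized
--
-- def clean_value(value: str | None) -> str:
--     return (value or "").strip()
--
-- def dedupe_player_pool(rows: list[dict[str, str]]) -> list[dict[str, str]]:
--     merged_by_key: dict[str, dict[str, str]] = {}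
--     order: list[str] = []
--
--     for row in rows:
--         key = clean_value(row.get("mlbam_id")) or normalize_name(clean_value(row.get("player_name")))
--         if key not in merged_by_key:
--             merged_by_key[key] = dict(row)
--             order.append(key)
--             continue
--
--         existing = merged_by_key[key]
--         for field, value in row.items():
--             if not clean_value(existing.get(field)) and clean_value(value):
--                 existing[field] = value
--
--     return [merged_by_key[key] for key in order]
-- ===== SOURCE B (Python) =====
-- import unicodedata
--
-- def normalize_name(name: str) -> str:
--     normalized = unicodedata.normalize("NFKD", name).encode("ascii", "ignore").decode("ascii")
--     normalized = normalized.lower().replace(".", " ").replace("-", " ")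
--     normalized = " ".join(normalized.split())
--     return normalized
--
-- def clean_value(value: str | None) -> str:
--     return (value or "").strip()
--
-- def merge_rows(merged: dict, row: dict) -> dict:
--     out = dict(merged)
--     for field, value in row.items():
--         if not clean_value(out.get(field)) and clean_value(value):
--             out[field] = value
--     return out
--
-- def dedupe_player_pool(rows: list[dict[str, str]]) -> list[dict[str, str]]:
--     groups: dict[str, list[dict[str, str]]] = {}
--     for row in rows:
--         key = clean_value(row.get("mlbam_id")) or normalize_name(clean_value(row.get("player_name")))
--         groups.setdefault(key, []).append(row)
--     result: list[dict[str, str]] = []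
--     for group in groups.values():
--         merged = dict(group[0])
--         for row in group[1:]:
--             merged = merge_rows(merged, row)
--         result.append(merged)
--     return result
-- ===== Notes on version B (the rewrite author's own statement) =====
-- stated objective: alternative
-- what changed: B first groups the rows into a dict mapping key to its list of rows (one setdefault pass, keys in first-occurrence order), then reduces each group with a first-non-empty-field merge, replacing A's single pass that merges each row into a growing merged_by_key dict and keeps a separate order list.
import Mathlib
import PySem

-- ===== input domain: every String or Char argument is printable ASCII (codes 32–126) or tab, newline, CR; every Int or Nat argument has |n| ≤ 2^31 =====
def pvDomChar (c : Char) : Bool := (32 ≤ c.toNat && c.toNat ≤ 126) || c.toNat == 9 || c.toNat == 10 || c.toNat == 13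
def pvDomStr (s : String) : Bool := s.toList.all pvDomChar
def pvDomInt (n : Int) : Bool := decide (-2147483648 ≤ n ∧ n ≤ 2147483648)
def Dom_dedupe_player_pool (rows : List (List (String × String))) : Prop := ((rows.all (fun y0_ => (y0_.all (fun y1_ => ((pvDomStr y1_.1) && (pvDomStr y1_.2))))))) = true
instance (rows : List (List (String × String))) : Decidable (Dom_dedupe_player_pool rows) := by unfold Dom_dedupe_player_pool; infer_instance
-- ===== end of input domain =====

-- B regroups the rows by key first (dict of key → list of rows) and then reduces each
-- group with a first-non-empty-field merge, instead of A's single pass that merges into a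
-- growing dict plus a separate order list; objective: alternative decomposition, same cost.

-- shared module helpers (used verbatim by both Pythons):
-- clean_value(v) = (v or "").strip()
def clean_value (s : String) : String := PySem.Str.strip s

-- normalize_name: unicodedata.normalize("NFKD", ·).encode("ascii","ignore") is the identity
-- on the ASCII domain Dom_, then lower / '.'→' ' / '-'→' ' / whitespace re-join.
def normalize_name (s : String) : String :=
  PySem.Str.join " "
    (PySem.Str.split₀ (PySem.Str.replace (PySem.Str.replace (PySem.Str.lower s) "." " ") "-" " "))

-- key = clean_value(row.get("mlbam_id")) or normalize_name(clean_value(row.get("player_name")))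
def rowKey (row : List (String × String)) : String :=
  let mid := clean_value ((PySem.Dict.mk row).getD "mlbam_id" "")
  if mid == "" then normalize_name (clean_value ((PySem.Dict.mk row).getD "player_name" "")) else mid

-- ===== PORT A =====
-- one iteration of A's loop over rows; state = (merged_by_key, order)
def stepA (st : PySem.Dict String (PySem.Dict String String) × List String)
    (row : List (String × String)) :
    PySem.Dict String (PySem.Dict String String) × List String :=
  let key := rowKey row
  if st.1.contains key = false then
    (st.1.insert key (PySem.Dict.mk row), st.2 ++ [key])
  else
    -- merged_by_key[key]: the key is present in this branch, so getD is exact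
    let existing := st.1.getD key PySem.Dict.empty
    (st.1.insert key
      (row.foldl (fun ex fv =>
        if PySem.Str.strip (ex.getD fv.1 "") == "" && !(PySem.Str.strip fv.2 == "")
        then ex.insert fv.1 fv.2 else ex) existing),
     st.2)

def dedupe_player_pool (rows : List (List (String × String))) : List (List (String × String)) :=
  let st := rows.foldl stepA (PySem.Dict.empty, [])
  st.2.map (fun k => (st.1.getD k PySem.Dict.empty).items)

-- ===== PORT B =====
-- merge_rows(merged, row): copy of merged with each still-empty field filled from row
def merge_rows (merged : PySem.Dict String String) (row : List (String × String)) :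
    PySem.Dict String String :=
  row.foldl (fun out fv =>
    if PySem.Str.strip (out.getD fv.1 "") == "" && !(PySem.Str.strip fv.2 == "")
    then out.insert fv.1 fv.2 else out) merged

-- dict(group[0]) reduced by merge_rows over group[1:]; groups are never empty
def mergeGroup (group : List (List (String × String))) : PySem.Dict String String :=
  match group with
  | [] => PySem.Dict.empty
  | r :: rest => rest.foldl merge_rows (PySem.Dict.mk r)

def dedupe_player_pool_alt (rows : List (List (String × String))) : List (List (String × String)) :=
  let groups := rows.foldl
    (fun g row => g.modify (rowKey row) [] (fun grp => grp ++ [row])) PySem.Dict.empty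
  groups.values.map (fun group => (mergeGroup group).items)

-- ===== PRECONDITION & SPEC =====
def Spec_dedupe_player_pool (rows : List (List (String × String))) (out : List (List (String × String))) : Prop := out = dedupe_player_pool_alt rows
instance (rows : List (List (String × String))) (out : List (List (String × String))) : Decidable (Spec_dedupe_player_pool rows out) := by unfold Spec_dedupe_player_pool; infer_instance

-- ===== CLAIM (what is proved, stated in full; the proofs are below) =====
def Claim_equal_dedupe_player_pool : Prop := ∀ (rows : List (List (String × String))), Dom_dedupe_player_pool rows → Spec_dedupe_player_pool rows (dedupe_player_pool rows)

-- ===== LEMMAS AND PROOFS =====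

-- canonical form both ports are reduced to
def canonical (rows : List (List (String × String))) : List (List (String × String)) :=
  (PySem.Set.ofList (rows.map rowKey)).map
    (fun k => (mergeGroup (rows.filter (fun r => rowKey r == k))).items)

lemma alt_eq_canonical (rows : List (List (String × String))) :
    dedupe_player_pool_alt rows = canonical rows := by
  unfold dedupe_player_pool_alt canonical
  show List.map (fun group => (mergeGroup group).items)
      ((rows.foldl (fun g row => g.modify (rowKey row) [] (fun grp => grp ++ [row]))
        PySem.Dict.empty).values) = _
  have hkeys :
      (rows.foldl (fun g row => g.modify (rowKey row) [] (fun grp => grp ++ [row]))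
        (PySem.Dict.empty : PySem.Dict String (List (List (String × String))))).keys
        = PySem.Set.ofList (rows.map rowKey) := by
    rw [PySem.Dict.keys_foldl_modify_key rows rowKey [] (fun _ row grp => grp ++ [row])]
    simp [PySem.Set.update_nil_left]
  have hnodup :
      (rows.foldl (fun g row => g.modify (rowKey row) [] (fun grp => grp ++ [row]))
        (PySem.Dict.empty : PySem.Dict String (List (List (String × String))))).keys.Nodup := by
    exact PySem.Dict.nodup_keys_foldl_modify_key rows rowKey [] (fun _ row grp => grp ++ [row]) _
      (by simp)
  have hgetD : ∀ k,
      (rows.foldl (fun g row => g.modify (rowKey row) [] (fun grp => grp ++ [row]))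
        (PySem.Dict.empty : PySem.Dict String (List (List (String × String))))).getD k []
        = rows.filter (fun r => rowKey r == k) := by
    intro k
    have hm : rows.foldl (fun g row => g.modify (rowKey row) [] (fun grp => grp ++ [row]))
        (PySem.Dict.empty : PySem.Dict String (List (List (String × String))))
        = (rows.map (fun r => (rowKey r, r))).foldl
            (fun d p => d.modify p.1 [] (fun grp => grp ++ [p.2])) PySem.Dict.empty := by
      rw [List.foldl_map]
    rw [hm, PySem.Dict.getD_foldl_modify_append]
    simp [List.filter_map, Function.comp_def, List.map_map]
  rw [PySem.Dict.values_eq_map_keys _ hnodup [], hkeys, List.map_map]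
  refine List.map_congr_left ?_
  intro k _
  simp [hgetD k]

-- invariant of A's loop: order tracks the keys, keys grow as a set, and each key's
-- merged dict is the reduce of its group
lemma stepA_inv (l : List (List (String × String))) :
    ∀ (d : PySem.Dict String (PySem.Dict String String)) (ord : List String),
      ord = d.keys →
      ((l.foldl stepA (d, ord)).2 = (l.foldl stepA (d, ord)).1.keys
      ∧ (l.foldl stepA (d, ord)).1.keys = PySem.Set.update d.keys (l.map rowKey)
      ∧ ∀ k, (l.foldl stepA (d, ord)).1.getD k PySem.Dict.empty =
          if d.contains k
          then (l.filter (fun r => rowKey r == k)).foldl merge_rows (d.getD k PySem.Dict.empty)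
          else mergeGroup (l.filter (fun r => rowKey r == k))) := by
  induction l with
  | nil =>
    intro d ord hord
    refine ⟨hord, by simp [PySem.Set.update_nil], ?_⟩
    intro k
    by_cases h : d.contains k = true
    · simp [h]
    · have hc : d.contains k = false := by simp_all
      simp only [List.foldl_nil, List.filter_nil]
      rw [if_neg (by simp [hc])]
      simp [mergeGroup, PySem.Dict.getD_of_not_contains d PySem.Dict.empty hc]
  | cons row tl ih =>
    intro d ord hord
    by_cases h : d.contains (rowKey row) = true
    · -- merge branch
      have hstep : stepA (d, ord) row =
          (d.insert (rowKey row) (merge_rows (d.getD (rowKey row) PySem.Dict.empty) row), ord) := by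
        simp [stepA, h, merge_rows]
      have hord' : ord = (d.insert (rowKey row)
          (merge_rows (d.getD (rowKey row) PySem.Dict.empty) row)).keys := by
        rw [PySem.Dict.keys_insert_of_contains d _ h]; exact hord
      obtain ⟨h1, h2, h3⟩ := ih _ _ hord'
      simp only [List.foldl_cons, hstep]
      refine ⟨h1, ?_, ?_⟩
      · rw [h2, PySem.Dict.keys_insert_of_contains d _ h, List.map_cons, PySem.Set.update_cons,
          PySem.Set.add_of_mem ((PySem.Dict.contains_iff_mem_keys d _).mp h)]
      · intro k
        rw [h3 k]
        by_cases hk : k = rowKey row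
        · subst hk
          rw [if_pos (by simp), if_pos h]
          simp
        · have hne : (rowKey row == k) = false := beq_eq_false_iff_ne.mpr (Ne.symm hk)
          have hkeq : (k == rowKey row) = false := beq_eq_false_iff_ne.mpr hk
          have hfc : (row :: tl).filter (fun r => rowKey r == k)
              = tl.filter (fun r => rowKey r == k) := by simp [hne]
          rw [hfc, PySem.Dict.contains_insert, PySem.Dict.getD_insert]
          simp [hkeq, hk]
    · -- new-key branch
      have hc : d.contains (rowKey row) = false := by simp_all
      have hstep : stepA (d, ord) row =
          (d.insert (rowKey row) (PySem.Dict.mk row), ord ++ [rowKey row]) := by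
        simp [stepA, hc]
      have hord' : ord ++ [rowKey row] = (d.insert (rowKey row) (PySem.Dict.mk row)).keys := by
        rw [PySem.Dict.keys_insert_of_not_contains d _ hc, hord]
      obtain ⟨h1, h2, h3⟩ := ih _ _ hord'
      simp only [List.foldl_cons, hstep]
      refine ⟨h1, ?_, ?_⟩
      · rw [h2, PySem.Dict.keys_insert_of_not_contains d _ hc, List.map_cons,
          PySem.Set.update_cons,
          PySem.Set.add_of_not_mem (fun hm => by
            exact absurd ((PySem.Dict.contains_iff_mem_keys d _).mpr hm) (by simp [hc]))]
      · intro k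
        rw [h3 k]
        by_cases hk : k = rowKey row
        · subst hk
          rw [if_pos (by simp), if_neg (by simp [hc])]
          simp [mergeGroup]
        · have hne : (rowKey row == k) = false := beq_eq_false_iff_ne.mpr (Ne.symm hk)
          have hkeq : (k == rowKey row) = false := beq_eq_false_iff_ne.mpr hk
          have hfc : (row :: tl).filter (fun r => rowKey r == k)
              = tl.filter (fun r => rowKey r == k) := by simp [hne]
          rw [hfc, PySem.Dict.contains_insert, PySem.Dict.getD_insert]
          simp [hkeq, hk]

lemma a_eq_canonical (rows : List (List (String × String))) :
    dedupe_player_pool rows = canonical rows := by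
  obtain ⟨h1, h2, h3⟩ := stepA_inv rows PySem.Dict.empty [] (by simp)
  unfold dedupe_player_pool canonical
  show ((rows.foldl stepA (PySem.Dict.empty, [])).2).map
      (fun k => ((rows.foldl stepA (PySem.Dict.empty, [])).1.getD k PySem.Dict.empty).items) = _
  rw [h1, h2]
  simp only [PySem.Dict.keys_empty, PySem.Set.update_nil_left]
  refine List.map_congr_left ?_
  intro k _
  rw [h3 k, if_neg (by simp)]

-- ===== VERDICT (by name: the statement is the Claim_ definition above) =====
theorem dedupe_player_pool_spec : Claim_equal_dedupe_player_pool := by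
  intro rows _
  unfold Spec_dedupe_player_pool
  rw [alt_eq_canonical, a_eq_canonical]
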